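-- pv_equiv track=rewrite | github.com/arenabox/ArenaBox | src/vizualize/topic_networks.py | get_edge_data
-- ===== SOURCE A (Python) =====
-- from collections import defaultdict, Counter
--
-- def get_edge_data(topic_to_docs):
--     # Edge Data
--     edge_data = defaultdict(dict)
--     for topic_nr, docs in topic_to_docs.items():
--         for topic_nr2, docs2 in topic_to_docs.items():
--             if topic_nr == topic_nr2:
--                 continue
--             commn = set(docs).intersection(set(docs2))
--             if len(commn)!=0:
--                 edge_data[topic_nr][topic_nr2] = len(commn)
--     return edge_data
-- ===== SOURCE B (Python) =====
-- from collections import defaultdict, Counter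
--
-- def get_edge_data(topic_to_docs):
--     # Invert to a per-document view: each document contributes one unit to every
--     # ordered pair of topics whose doc-sets contain it; then read the pair counts off.
--     doc_sets = [(t, set(docs)) for t, docs in topic_to_docs.items()]
--     all_docs, seen = [], set()
--     for docs in topic_to_docs.values():
--         for d in docs:
--             if d not in seen:
--                 seen.add(d)
--                 all_docs.append(d)
--     pair_counts = Counter()
--     for d in all_docs:
--         ts = [t for t, s in doc_sets if d in s]
--         for i, a in enumerate(ts):
--             for b in ts[i + 1:]:
--                 pair_counts[(a, b)] += 1
--                 pair_counts[(b, a)] += 1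
--     edge_data = defaultdict(dict)
--     for a, _ in doc_sets:
--         for b, _ in doc_sets:
--             c = pair_counts.get((a, b))
--             if c:
--                 edge_data[a][b] = c
--     return edge_data
-- ===== Notes on version B (the rewrite author's own statement) =====
-- stated objective: alternative
-- what changed: Instead of intersecting the doc-sets of every ordered topic pair, B inverts the data: for each distinct document it lists the topics containing it and accumulates one unit per ordered topic pair into a Counter, then assembles the nested dict by lookups; Pre_ excludes association lists with duplicate topic ids, which do not represent a Python dict input.
import Mathlib
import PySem

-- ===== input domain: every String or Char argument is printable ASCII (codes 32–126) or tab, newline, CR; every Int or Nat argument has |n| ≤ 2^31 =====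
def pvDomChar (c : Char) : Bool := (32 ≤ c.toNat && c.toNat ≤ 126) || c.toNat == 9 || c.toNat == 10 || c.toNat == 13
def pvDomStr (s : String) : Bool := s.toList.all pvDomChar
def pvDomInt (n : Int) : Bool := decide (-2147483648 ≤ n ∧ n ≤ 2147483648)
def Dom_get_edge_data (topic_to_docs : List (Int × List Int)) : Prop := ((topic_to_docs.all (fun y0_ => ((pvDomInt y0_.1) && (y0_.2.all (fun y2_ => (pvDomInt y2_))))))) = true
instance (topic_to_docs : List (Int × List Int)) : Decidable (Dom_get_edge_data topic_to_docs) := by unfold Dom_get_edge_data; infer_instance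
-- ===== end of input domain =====

-- B replaces A's per-pair set intersections by a per-document inverted index whose pair counts
-- are accumulated once; equivalence of the two nested-dict results is proved for dict inputs
-- (association lists with distinct keys).

-- ===== PORT A =====
def get_edge_data (topic_to_docs : List (Int × List Int)) : List (Int × List (Int × Int)) :=
  -- edge_data = defaultdict(dict); nested loop over items; commn = set(docs) & set(docs2)
  let ed : PySem.Dict Int (PySem.Dict Int Int) :=
    topic_to_docs.foldl (fun ed p =>
      topic_to_docs.foldl (fun ed q =>
        if p.1 == q.1 then ed
        else
          let commn : PySem.Set Int := PySem.Set.inter (PySem.Set.ofList p.2) (PySem.Set.ofList q.2)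
          if commn.length ≠ 0 then
            ed.modify p.1 PySem.Dict.empty (fun d => d.insert q.1 (commn.length : Int))
          else ed) ed) PySem.Dict.empty
  ed.items.map (fun r => (r.1, r.2.items))

-- ===== PORT B =====
-- doc_sets = [(t, set(docs)) for t, docs in topic_to_docs.items()]
def pvDocSets (topic_to_docs : List (Int × List Int)) : List (Int × PySem.Set Int) :=
  topic_to_docs.map (fun p => (p.1, PySem.Set.ofList p.2))

-- pair_counts[(a,b)] += 1; pair_counts[(b,a)] += 1
def pvBump (c : PySem.Dict (Int × Int) Int) (a b : Int) : PySem.Dict (Int × Int) Int :=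
  (c.modify (a, b) 0 (· + 1)).modify (b, a) 0 (· + 1)

def get_edge_data_alt (topic_to_docs : List (Int × List Int)) : List (Int × List (Int × Int)) :=
  let docSets := pvDocSets topic_to_docs
  -- all_docs, seen = [], set(); append each unseen doc
  let st : PySem.Set Int × List Int :=
    topic_to_docs.foldl (fun st p =>
      p.2.foldl (fun st d =>
        if PySem.Set.contains st.1 d then st else (PySem.Set.add st.1 d, st.2 ++ [d])) st)
      (PySem.Set.empty, [])
  let allDocs := st.2
  -- pair_counts = Counter(); for d in all_docs: ts = [...]; for i,a in enumerate(ts): for b in ts[i+1:]: ...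
  let cnt : PySem.Dict (Int × Int) Int :=
    allDocs.foldl (fun c d =>
      let ts : List Int := (docSets.filter (fun q => PySem.Set.contains q.2 d)).map (fun q => q.1)
      (PySem.List.enumerate ts).foldl (fun c ia =>
        (PySem.List.slice ts (some (ia.1 + 1)) none).foldl (fun c b => pvBump c ia.2 b) c) c)
      PySem.Dict.empty
  -- edge_data = defaultdict(dict); for a,_ in doc_sets: for b,_ in doc_sets: c = pair_counts.get((a,b)); if c: ...
  let ed : PySem.Dict Int (PySem.Dict Int Int) :=
    docSets.foldl (fun ed p =>
      docSets.foldl (fun ed q =>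
        match cnt.get? (p.1, q.1) with
        | none => ed
        | some c => if c ≠ 0 then ed.modify p.1 PySem.Dict.empty (fun d => d.insert q.1 c) else ed) ed)
      PySem.Dict.empty
  ed.items.map (fun r => (r.1, r.2.items))

-- ===== PRECONDITION & SPEC =====
-- Pre_ excludes association lists with duplicate topic ids: they do not represent a Python dict
-- (A's argument), so their behaviour under the list/dict convention is accidental.
def Pre_get_edge_data (topic_to_docs : List (Int × List Int)) : Prop :=
  (topic_to_docs.map Prod.fst).Nodup
instance (topic_to_docs : List (Int × List Int)) : Decidable (Pre_get_edge_data topic_to_docs) := by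
  unfold Pre_get_edge_data; infer_instance

def pvWitness_get_edge_data : (List (Int × List Int)) := [(1, [10, 11]), (2, [11, 12]), (3, [])]

def Spec_get_edge_data (topic_to_docs : List (Int × List Int)) (out : List (Int × List (Int × Int))) : Prop := out = get_edge_data_alt topic_to_docs
instance (topic_to_docs : List (Int × List Int)) (out : List (Int × List (Int × Int))) : Decidable (Spec_get_edge_data topic_to_docs out) := by unfold Spec_get_edge_data; infer_instance

-- ===== CLAIM (what is proved, stated in full; the proofs are below) =====
def Claim_equal_get_edge_data : Prop := ∀ (topic_to_docs : List (Int × List Int)), Dom_get_edge_data topic_to_docs → Pre_get_edge_data topic_to_docs → Spec_get_edge_data topic_to_docs (get_edge_data topic_to_docs)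

-- ===== LEMMAS AND PROOFS =====

-- proof-only abbreviations
def pvTs (l : List (Int × List Int)) (d : Int) : List Int :=
  ((pvDocSets l).filter (fun q => PySem.Set.contains q.2 d)).map (fun q => q.1)

-- the per-document pair loop, in structural form
def pvPairs (h : Int) (t : List Int) (c : PySem.Dict (Int × Int) Int) : PySem.Dict (Int × Int) Int :=
  t.foldl (fun c b => pvBump c h b) c

def pvPairsR : List Int → PySem.Dict (Int × Int) Int → PySem.Dict (Int × Int) Int
  | [], c => c
  | h :: t, c => pvPairsR t (pvPairs h t c)

-- the seen/all_docs loop returns the distinct docs (state stays duplicated)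
theorem pv_seen_inner (ds : List Int) (s : PySem.Set Int) :
    ds.foldl (fun st d =>
        if PySem.Set.contains st.1 d then st else (PySem.Set.add st.1 d, st.2 ++ [d]))
      (s, (s : List Int)) = (s.update ds, s.update ds) := by
  induction ds generalizing s with
  | nil => simp [PySem.Set.update]
  | cons d ds ih =>
    rw [PySem.Set.update_cons]
    by_cases hd : d ∈ s
    · have : PySem.Set.contains s d = true := (PySem.Set.contains_iff s d).mpr hd
      simp only [List.foldl_cons, this, if_true]
      rw [PySem.Set.add_of_mem hd] at *
      exact ih s
    · have : PySem.Set.contains s d = false := by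
        rw [Bool.eq_false_iff]; intro h; exact hd ((PySem.Set.contains_iff s d).mp h)
      simp only [List.foldl_cons, this, Bool.false_eq_true, if_false]
      rw [PySem.Set.add_of_not_mem hd] at *
      exact ih (s ++ [d])

theorem pv_seen_outer (l : List (Int × List Int)) (s : PySem.Set Int) :
    l.foldl (fun st p => p.2.foldl (fun st d =>
        if PySem.Set.contains st.1 d then st else (PySem.Set.add st.1 d, st.2 ++ [d])) st)
      (s, (s : List Int)) =
      (s.update (l.flatMap (fun p => p.2)), s.update (l.flatMap (fun p => p.2))) := by
  induction l generalizing s with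
  | nil => simp [PySem.Set.update]
  | cons p l ih =>
    rw [List.foldl_cons, List.flatMap_cons, PySem.Set.update_append, pv_seen_inner p.2 s]
    exact ih (s.update p.2)

theorem pv_seen (l : List (Int × List Int)) :
    l.foldl (fun st p => p.2.foldl (fun st d =>
        if PySem.Set.contains st.1 d then st else (PySem.Set.add st.1 d, st.2 ++ [d])) st)
      (PySem.Set.empty, []) =
      (PySem.Set.ofList (l.flatMap (fun p => p.2)), PySem.Set.ofList (l.flatMap (fun p => p.2))) := by
  have h := pv_seen_outer l PySem.Set.empty
  rw [PySem.Set.update_empty] at h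
  exact h

-- the enumerate/slice pair loop is the structural right-triangle loop
theorem pv_enum_slice_gen (ts : List Int) (pre : List Int) (c : PySem.Dict (Int × Int) Int) :
    (PySem.List.enumerate ts (pre.length : Int)).foldl (fun c ia =>
        (PySem.List.slice (pre ++ ts) (some (ia.1 + 1)) none).foldl (fun c b => pvBump c ia.2 b) c) c =
      pvPairsR ts c := by
  induction ts generalizing pre c with
  | nil => rw [PySem.List.enumerate_nil, List.foldl_nil, pvPairsR]
  | cons h t ih =>
    rw [PySem.List.enumerate_cons, List.foldl_cons]
    have hsl : PySem.List.slice (pre ++ h :: t) (some ((pre.length : Int) + 1)) none = t := by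
      rw [PySem.List.slice_some_none]
      rw [show ((pre.length : Int) + 1) = ((pre.length + 1 : Nat) : Int) by push_cast; ring]
      rw [PySem.List.clampIdx_natCast]
      rw [show min (pre.length + 1) ((pre ++ h :: t).length) = (pre ++ [h]).length by
        simp only [List.length_append, List.length_cons, List.length_nil]; omega]
      rw [show pre ++ h :: t = (pre ++ [h]) ++ t by simp, List.drop_left]
    have hstep : ∀ (c' : PySem.Dict (Int × Int) Int),
        (PySem.List.slice (pre ++ h :: t) (some (((pre.length : Int), h).1 + 1)) none).foldl
          (fun c b => pvBump c ((pre.length : Int), h).2 b) c' = pvPairs h t c' := by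
      intro c'; rw [hsl]; rfl
    rw [hstep c]
    have hrec := ih (pre ++ [h]) (pvPairs h t c)
    rw [show (((pre ++ [h]).length : Nat) : Int) = (pre.length : Int) + 1 by simp] at hrec
    rw [show (pre ++ [h]) ++ t = pre ++ h :: t by simp] at hrec
    rw [pvPairsR]
    exact hrec

theorem pv_enum_slice (ts : List Int) (c : PySem.Dict (Int × Int) Int) :
    (PySem.List.enumerate ts).foldl (fun c ia =>
        (PySem.List.slice ts (some (ia.1 + 1)) none).foldl (fun c b => pvBump c ia.2 b) c) c =
      pvPairsR ts c := by
  have h := pv_enum_slice_gen ts [] c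
  simpa using h

theorem pv_bump_getD (c : PySem.Dict (Int × Int) Int) (a b x y : Int) :
    (pvBump c a b).getD (x, y) 0 =
      c.getD (x, y) 0 + (if (x, y) = (a, b) then 1 else 0) + (if (x, y) = (b, a) then 1 else 0) := by
  unfold pvBump
  rw [PySem.Dict.getD_modify, PySem.Dict.getD_modify, PySem.Dict.getD_modify]
  by_cases h1 : (x, y) = ((b, a) : Int × Int)
  · rw [if_pos h1]
    by_cases h2 : ((b, a) : Int × Int) = (a, b)
    · rw [if_pos h2, if_pos (h1.trans h2), if_pos h1]
      simp only [h1, h2]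
      try ring
    · rw [if_neg h2, if_neg (show ¬ (x, y) = ((a, b) : Int × Int) from fun h3 => h2 (h1.symm.trans h3)),
        if_pos h1]
      simp only [h1]
      try ring
  · rw [if_neg h1]
    by_cases h3 : (x, y) = ((a, b) : Int × Int)
    · rw [if_pos h3, if_pos h3, if_neg h1]
      simp only [h3]
      try ring
    · rw [if_neg h3, if_neg h3, if_neg h1]
      try ring

theorem pv_bump_contains (c : PySem.Dict (Int × Int) Int) (a b x y : Int) :
    ((pvBump c a b).contains (x, y) = true) ↔
      (c.contains (x, y) = true ∨ (x, y) = (a, b) ∨ (x, y) = (b, a)) := by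
  simp only [pvBump, PySem.Dict.contains_modify, Bool.or_eq_true, beq_iff_eq]
  tauto

set_option maxRecDepth 8192 in
theorem pv_pairs_getD (t : List Int) (h x y : Int) (c : PySem.Dict (Int × Int) Int)
    (hxy : x ≠ y) (hnd : t.Nodup) :
    (pvPairs h t c).getD (x, y) 0 = c.getD (x, y) 0
      + (if h = x ∧ y ∈ t then 1 else 0) + (if h = y ∧ x ∈ t then 1 else 0) := by
  induction t generalizing c with
  | nil => simp [pvPairs]
  | cons b t' ih =>
    have hb : b ∉ t' := (List.nodup_cons.mp hnd).1
    have ht' : t'.Nodup := (List.nodup_cons.mp hnd).2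
    have hdef : pvPairs h (b :: t') c = pvPairs h t' (pvBump c h b) := rfl
    rw [hdef, ih (pvBump c h b) ht', pv_bump_getD]
    simp only [List.mem_cons, Prod.mk.injEq]
    by_cases hx : h = x <;> by_cases hy : h = y <;> by_cases hyb : y = b <;> by_cases hxb : x = b <;>
      by_cases hyt : y ∈ t' <;> by_cases hxt : x ∈ t' <;>
      simp_all <;> omega

theorem pv_pairs_contains (t : List Int) (h x y : Int) (c : PySem.Dict (Int × Int) Int) :
    ((pvPairs h t c).contains (x, y) = true) ↔
      (c.contains (x, y) = true ∨ (h = x ∧ y ∈ t) ∨ (h = y ∧ x ∈ t)) := by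
  induction t generalizing c with
  | nil => simp [pvPairs]
  | cons b t' ih =>
    have hdef : pvPairs h (b :: t') c = pvPairs h t' (pvBump c h b) := rfl
    rw [hdef, ih, pv_bump_contains]
    simp only [List.mem_cons, Prod.mk.injEq]
    constructor
    · rintro ((hc | ⟨rfl, rfl⟩ | ⟨rfl, rfl⟩) | ⟨rfl, hyt⟩ | ⟨rfl, hxt⟩) <;> tauto
    · rintro (hc | ⟨rfl, rfl | hyt⟩ | ⟨rfl, rfl | hxt⟩) <;> tauto

set_option maxRecDepth 8192 in
theorem pv_pairsR_getD (ts : List Int) (x y : Int) (c : PySem.Dict (Int × Int) Int)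
    (hxy : x ≠ y) (hnd : ts.Nodup) :
    (pvPairsR ts c).getD (x, y) 0 =
      c.getD (x, y) 0 + (if x ∈ ts ∧ y ∈ ts then 1 else 0) := by
  induction ts generalizing c with
  | nil => simp [pvPairsR]
  | cons h t ih =>
    have hh : h ∉ t := (List.nodup_cons.mp hnd).1
    have ht : t.Nodup := (List.nodup_cons.mp hnd).2
    rw [pvPairsR, ih (pvPairs h t c) ht, pv_pairs_getD t h x y c hxy ht]
    simp only [List.mem_cons]
    by_cases hx : h = x <;> by_cases hy : h = y <;> by_cases hxt : x ∈ t <;> by_cases hyt : y ∈ t <;>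
      simp_all <;> omega

theorem pv_pairsR_contains (ts : List Int) (x y : Int) (c : PySem.Dict (Int × Int) Int)
    (hxy : x ≠ y) (hnd : ts.Nodup) :
    ((pvPairsR ts c).contains (x, y) = true) ↔
      (c.contains (x, y) = true ∨ (x ∈ ts ∧ y ∈ ts)) := by
  induction ts generalizing c with
  | nil => simp [pvPairsR]
  | cons h t ih =>
    have ht : t.Nodup := (List.nodup_cons.mp hnd).2
    rw [pvPairsR, ih (pvPairs h t c) ht, pv_pairs_contains]
    simp only [List.mem_cons]
    constructor
    · rintro ((hc | ⟨rfl, hyt⟩ | ⟨rfl, hxt⟩) | ⟨hxt, hyt⟩) <;> tauto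
    · rintro (hc | ⟨rfl | hxt, rfl | hyt⟩) <;> tauto

theorem pv_pairsR_diag (ts : List Int) (x : Int) (c : PySem.Dict (Int × Int) Int)
    (hnd : ts.Nodup) :
    (pvPairsR ts c).contains (x, x) = c.contains (x, x) := by
  induction ts generalizing c with
  | nil => simp [pvPairsR]
  | cons h t ih =>
    have hh : h ∉ t := (List.nodup_cons.mp hnd).1
    have ht : t.Nodup := (List.nodup_cons.mp hnd).2
    rw [pvPairsR, ih (pvPairs h t c) ht]
    have hiff := pv_pairs_contains t h x x c
    have hpc : (pvPairs h t c).contains (x, x) = c.contains (x, x) := by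
      by_cases hc : c.contains (x, x) = true
      · rw [hc]; exact hiff.mpr (Or.inl hc)
      · have : ¬ (pvPairs h t c).contains (x, x) = true := by
          rw [hiff]
          rintro (h1 | ⟨rfl, h2⟩ | ⟨rfl, h2⟩) <;> first | exact hc h1 | exact hh h2
        simp only [Bool.not_eq_true] at this hc
        rw [this, hc]
      
    exact hpc

-- the counter over all documents
theorem pv_cnt_getD (ds : List Int) (l : List (Int × List Int)) (x y : Int)
    (c : PySem.Dict (Int × Int) Int) (hxy : x ≠ y) (hts : ∀ d, (pvTs l d).Nodup) :
    (ds.foldl (fun c d => pvPairsR (pvTs l d) c) c).getD (x, y) 0 =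
      c.getD (x, y) 0 + (ds.countP (fun d => decide (x ∈ pvTs l d ∧ y ∈ pvTs l d)) : Int) := by
  induction ds generalizing c with
  | nil => simp
  | cons d ds ih =>
    rw [List.foldl_cons, ih (pvPairsR (pvTs l d) c),
      pv_pairsR_getD (pvTs l d) x y c hxy (hts d), List.countP_cons]
    simp only [decide_eq_true_eq]
    push_cast
    split_ifs <;> omega

theorem pv_cnt_contains (ds : List Int) (l : List (Int × List Int)) (x y : Int)
    (c : PySem.Dict (Int × Int) Int) (hxy : x ≠ y) (hts : ∀ d, (pvTs l d).Nodup) :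
    ((ds.foldl (fun c d => pvPairsR (pvTs l d) c) c).contains (x, y) = true) ↔
      (c.contains (x, y) = true ∨ ∃ d ∈ ds, x ∈ pvTs l d ∧ y ∈ pvTs l d) := by
  induction ds generalizing c with
  | nil => simp
  | cons d ds ih =>
    rw [List.foldl_cons, ih (pvPairsR (pvTs l d) c),
      pv_pairsR_contains (pvTs l d) x y c hxy (hts d)]
    simp only [List.exists_mem_cons_iff]
    tauto

theorem pv_cnt_diag (ds : List Int) (l : List (Int × List Int)) (x : Int)
    (c : PySem.Dict (Int × Int) Int) (hts : ∀ d, (pvTs l d).Nodup) :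
    (ds.foldl (fun c d => pvPairsR (pvTs l d) c) c).contains (x, x) = c.contains (x, x) := by
  induction ds generalizing c with
  | nil => simp
  | cons d ds ih =>
    rw [List.foldl_cons, ih (pvPairsR (pvTs l d) c), pv_pairsR_diag (pvTs l d) x c (hts d)]

-- pvTs membership and nodup
theorem pv_ts_nodup (l : List (Int × List Int)) (hnd : (l.map Prod.fst).Nodup) (d : Int) :
    (pvTs l d).Nodup := by
  have h1 : (((pvDocSets l).filter (fun q => PySem.Set.contains q.2 d)).map (fun q => q.1)).Sublist
      ((pvDocSets l).map (fun q => q.1)) := List.filter_sublist.map _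
  have h2 : (pvDocSets l).map (fun q => q.1) = l.map Prod.fst := by
    rw [pvDocSets, List.map_map]; rfl
  rw [h2] at h1
  exact h1.nodup hnd

theorem pv_eq_of_fst_eq (l : List (Int × List Int)) (hnd : (l.map Prod.fst).Nodup)
    {p q : Int × List Int} (hp : p ∈ l) (hq : q ∈ l) (h : p.1 = q.1) : p = q := by
  induction l with
  | nil => cases hp
  | cons r l ih =>
    have hr : r.1 ∉ l.map Prod.fst := (List.nodup_cons.mp hnd).1
    have hl : (l.map Prod.fst).Nodup := (List.nodup_cons.mp hnd).2
    rcases List.mem_cons.mp hp with rfl | hp' <;> rcases List.mem_cons.mp hq with rfl | hq'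
    · rfl
    · exact absurd (h ▸ List.mem_map_of_mem hq') hr
    · exact absurd (h ▸ List.mem_map_of_mem hp') hr
    · exact ih hl hp' hq'

theorem pv_mem_ts (l : List (Int × List Int)) (hnd : (l.map Prod.fst).Nodup)
    {p : Int × List Int} (hp : p ∈ l) (d : Int) :
    (p.1 ∈ pvTs l d) ↔ d ∈ p.2 := by
  constructor
  · intro hmem
    rw [pvTs] at hmem
    obtain ⟨q', hq', hfst⟩ := List.mem_map.mp hmem
    obtain ⟨hq'mem, hcont⟩ := List.mem_filter.mp hq'
    obtain ⟨q, hq, rfl⟩ := List.mem_map.mp hq'mem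
    have : q = p := pv_eq_of_fst_eq l hnd hq hp hfst
    subst this
    exact (PySem.Set.mem_ofList _ _).mp ((PySem.Set.contains_iff _ _).mp hcont)
  · intro hd
    rw [pvTs]
    refine List.mem_map.mpr ⟨(p.1, PySem.Set.ofList p.2), List.mem_filter.mpr ⟨?_, ?_⟩, rfl⟩
    · exact List.mem_map.mpr ⟨p, hp, rfl⟩
    · exact (PySem.Set.contains_iff _ _).mpr ((PySem.Set.mem_ofList _ _).mpr hd)

-- the pair count equals the intersection size
theorem pv_count_eq_inter (l : List (Int × List Int)) (hnd : (l.map Prod.fst).Nodup)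
    {p q : Int × List Int} (hp : p ∈ l) (hq : q ∈ l) :
    ((PySem.Set.ofList (l.flatMap (fun r => r.2))).countP
        (fun d => decide (p.1 ∈ pvTs l d ∧ q.1 ∈ pvTs l d)) : Int) =
      ((PySem.Set.inter (PySem.Set.ofList p.2) (PySem.Set.ofList q.2)).length : Int) := by
  have hcong : (PySem.Set.ofList (l.flatMap (fun r => r.2))).countP
        (fun d => decide (p.1 ∈ pvTs l d ∧ q.1 ∈ pvTs l d)) =
      (PySem.Set.ofList (l.flatMap (fun r => r.2))).countP
        (fun d => decide (d ∈ p.2 ∧ d ∈ q.2)) := by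
    apply List.countP_congr
    intro d _
    simp only [decide_eq_true_eq, pv_mem_ts l hnd hp, pv_mem_ts l hnd hq]
  rw [hcong]
  rw [PySem.Set.inter]
  rw [List.countP_eq_length_filter]
  congr 1
  apply List.Perm.length_eq
  rw [List.perm_ext_iff_of_nodup (PySem.Set.nodup_ofList _ |>.filter _)
    (PySem.Set.nodup_ofList _ |>.filter _)]
  intro d
  simp only [List.mem_filter, decide_eq_true_eq, PySem.Set.mem_ofList,
    PySem.Set.contains_iff, List.mem_flatMap]
  constructor
  · rintro ⟨-, hdp, hdq⟩
    exact ⟨hdp, hdq⟩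
  · rintro ⟨hdp, hdq⟩
    exact ⟨⟨p, hp, hdp⟩, hdp, hdq⟩

-- proof-only views of B's two phases
def pvCnt (l : List (Int × List Int)) : PySem.Dict (Int × Int) Int :=
  (PySem.Set.ofList (l.flatMap (fun p => p.2))).foldl
    (fun c d => pvPairsR (pvTs l d) c) PySem.Dict.empty

def pvAssemble (l : List (Int × List Int)) (cnt : PySem.Dict (Int × Int) Int) :
    List (Int × List (Int × Int)) :=
  (l.foldl (fun ed p =>
    l.foldl (fun (ed : PySem.Dict Int (PySem.Dict Int Int)) (q : Int × List Int) =>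
      match cnt.get? (p.1, q.1) with
      | none => ed
      | some c => if c ≠ 0 then ed.modify p.1 PySem.Dict.empty (fun d => d.insert q.1 c) else ed) ed)
    PySem.Dict.empty).items.map (fun r => (r.1, r.2.items))

theorem pv_alt_eq (l : List (Int × List Int)) :
    get_edge_data_alt l = pvAssemble l (pvCnt l) := by
  simp only [get_edge_data_alt, pv_seen l, pv_enum_slice, pvDocSets, List.foldl_map]
  rfl

theorem pv_cnt_get?_diag (l : List (Int × List Int)) (hpre : (l.map Prod.fst).Nodup) (x : Int) :
    (pvCnt l).get? (x, x) = none := by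
  rw [PySem.Dict.get?_eq_none_iff_contains, pvCnt,
    pv_cnt_diag (PySem.Set.ofList (l.flatMap (fun p => p.2))) l x PySem.Dict.empty
      (pv_ts_nodup l hpre)]
  exact PySem.Dict.contains_empty _

theorem pv_cnt_get?_ne (l : List (Int × List Int)) (hpre : (l.map Prod.fst).Nodup)
    {p q : Int × List Int} (hp : p ∈ l) (hq : q ∈ l) (hne : p.1 ≠ q.1) :
    (pvCnt l).get? (p.1, q.1) =
      (if (PySem.Set.inter (PySem.Set.ofList p.2) (PySem.Set.ofList q.2)).length = 0 then none
       else some ((PySem.Set.inter (PySem.Set.ofList p.2) (PySem.Set.ofList q.2)).length : Int)) := by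
  have hts := pv_ts_nodup l hpre
  have hD : (pvCnt l).getD (p.1, q.1) 0 =
      PySem.Dict.empty.getD (p.1, q.1) 0 +
        (((PySem.Set.ofList (l.flatMap (fun p => p.2))).countP
          (fun d => decide (p.1 ∈ pvTs l d ∧ q.1 ∈ pvTs l d)) : Nat) : Int) := by
    rw [pvCnt]
    exact pv_cnt_getD _ l p.1 q.1 PySem.Dict.empty hne hts
  rw [PySem.Dict.getD_empty, zero_add] at hD
  have hcount := pv_count_eq_inter l hpre hp hq
  have hEx : ((pvCnt l).contains (p.1, q.1) = true) ↔
      (∃ d ∈ PySem.Set.ofList (l.flatMap (fun p => p.2)), p.1 ∈ pvTs l d ∧ q.1 ∈ pvTs l d) := by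
    rw [pvCnt, pv_cnt_contains _ l p.1 q.1 PySem.Dict.empty hne hts]
    simp [PySem.Dict.contains_empty]
  by_cases hz : (PySem.Set.inter (PySem.Set.ofList p.2) (PySem.Set.ofList q.2)).length = 0
  · rw [if_pos hz]
    rw [PySem.Dict.get?_eq_none_iff_contains]
    rw [Bool.eq_false_iff]
    intro hc
    obtain ⟨d, hd, hpd, hqd⟩ := hEx.mp hc
    have hpos : 0 < (PySem.Set.ofList (l.flatMap (fun p => p.2))).countP
        (fun d => decide (p.1 ∈ pvTs l d ∧ q.1 ∈ pvTs l d)) :=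
      List.countP_pos_iff.mpr ⟨d, hd, by simp [hpd, hqd]⟩
    omega
  · rw [if_neg hz]
    have hcpos : 0 < (PySem.Set.ofList (l.flatMap (fun p => p.2))).countP
        (fun d => decide (p.1 ∈ pvTs l d ∧ q.1 ∈ pvTs l d)) := by omega
    obtain ⟨d, hd, hdp⟩ := List.countP_pos_iff.mp hcpos
    have hc : (pvCnt l).contains (p.1, q.1) = true := by
      refine hEx.mpr ⟨d, hd, ?_⟩
      simpa using hdp
    cases hg : (pvCnt l).get? (p.1, q.1) with
    | none =>
      rw [PySem.Dict.get?_eq_none_iff_contains] at hg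
      rw [hg] at hc; cases hc
    | some v =>
      have hv := PySem.Dict.getD_of_get?_eq_some _ 0 hg
      have : v = ((PySem.Set.inter (PySem.Set.ofList p.2) (PySem.Set.ofList q.2)).length : Int) := by
        omega
      rw [this]

-- ===== VERDICT (by name: the statement is the Claim_ definition above) =====
theorem get_edge_data_spec : Claim_equal_get_edge_data := by
  intro l _hdom hpre
  unfold Spec_get_edge_data
  unfold Pre_get_edge_data at hpre
  rw [pv_alt_eq l]
  simp only [get_edge_data, pvAssemble]
  refine congrArg (fun ed : PySem.Dict Int (PySem.Dict Int Int) =>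
    ed.items.map (fun r => (r.1, r.2.items))) ?_
  refine PySem.List.foldl_congr_mem l _ _ _ ?_
  intro ed p hp
  refine PySem.List.foldl_congr_mem l _ _ _ ?_
  intro ed' q hq
  by_cases hpq : p.1 = q.1
  · have hbeq : (p.1 == q.1) = true := beq_iff_eq.mpr hpq
    rw [if_pos hbeq, hpq, pv_cnt_get?_diag l hpre q.1]
  · have hbeq : ¬ (p.1 == q.1) = true := by simp [hpq]
    rw [if_neg hbeq, pv_cnt_get?_ne l hpre hp hq hpq]
    by_cases hz : (PySem.Set.inter (PySem.Set.ofList p.2) (PySem.Set.ofList q.2)).length = 0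
    · rw [if_pos hz, if_neg (by omega)]
    · rw [if_neg hz, if_pos (by omega)]
      simp only [ne_eq, Int.natCast_eq_zero]
      simp
      intro hnil
      rw [hnil] at hz
      simp at hz
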